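-- pv_equiv track=rewrite | github.com/DiegoEsperidion/Laboratorio_3_Criptografia | hash.py | rellenar
-- ===== SOURCE A (Python) =====
-- def rellenar(palabra,pos):
--     #Esta funcion rellena una palabra menor a 55 caracteres con los
--     # caracteres contenidos en salt, se termina al tener 55 caracteres.
--     salt=["1","A","a","B","b","C","c"]
--     if pos == len(salt):
--         pos=0
--     if len(palabra) <40:
--         pal=palabra+salt[pos]
--         pos=pos+1
--         pal=rellenar(pal,pos)
--         return pal
--     else:
--         return palabra
-- ===== SOURCE B (Python) =====
-- def rellenar(palabra, pos):
--     # Closed-form: append the cyclic salt characters in one shot instead of recursing.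
--     salt = "1AaBbCc"
--     faltan = 40 - len(palabra)
--     if faltan <= 0:
--         return palabra
--     return palabra + "".join(salt[(pos + i) % 7] for i in range(faltan))
-- ===== Notes on version B (the rewrite author's own statement) =====
-- stated objective: simpler
-- what changed: Replaced the one-character-per-call recursion (with explicit wrap-around reset of pos) by a closed-form build: compute how many characters are missing and append them in one pass using (pos+i) % 7 into the salt string.
-- crash fix: When len(palabra) < 40 and pos is outside -7..7 A raises IndexError on salt[pos]; B returns the word padded cyclically from position pos % 7. — e.g. on rellenar("", 100): A raises IndexError, B returns "aBbCc1AaBbCc1AaBbCc1AaBbCc1AaBbCc1AaBbCc"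
import Mathlib
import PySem

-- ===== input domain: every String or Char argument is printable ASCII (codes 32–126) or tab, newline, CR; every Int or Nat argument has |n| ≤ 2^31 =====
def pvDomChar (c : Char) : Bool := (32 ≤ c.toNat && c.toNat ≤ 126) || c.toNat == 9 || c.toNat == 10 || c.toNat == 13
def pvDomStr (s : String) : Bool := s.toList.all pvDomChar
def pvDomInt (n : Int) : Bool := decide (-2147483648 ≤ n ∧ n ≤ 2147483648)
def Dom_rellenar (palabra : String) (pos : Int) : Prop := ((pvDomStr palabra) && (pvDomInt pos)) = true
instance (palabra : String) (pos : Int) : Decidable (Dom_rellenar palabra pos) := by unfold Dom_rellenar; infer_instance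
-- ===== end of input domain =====

-- B replaces A's per-character recursion by a closed-form one-pass pad; equivalence is on the return value.

-- ===== PORT A =====
-- A's salt is a list of 1-character strings; it is ported as a list of Chars and
-- 'palabra + salt[pos]' as String.push, which is the same concatenation step for step.
def rellenar (palabra : String) (pos : Int) : String :=
  let salt : List Char := ['1', 'A', 'a', 'B', 'b', 'C', 'c']
  let pos1 : Int := if pos = (salt.length : Int) then 0 else pos
  if _h : palabra.length < 40 then
    match PySem.List.pyGet? salt pos1 with
    | some c => rellenar (palabra.push c) (pos1 + 1)
    | none => palabra   -- Python raises IndexError here; excluded by Pre_rellenar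
  else palabra
termination_by 40 - palabra.length
decreasing_by simp [String.length_push]; omega

-- ===== PORT B =====
def rellenar_alt (palabra : String) (pos : Int) : String :=
  let salt : List Char := ['1', 'A', 'a', 'B', 'b', 'C', 'c']
  let faltan : Int := 40 - (palabra.length : Int)
  if faltan ≤ 0 then palabra
  else palabra ++ String.ofList ((List.range faltan.toNat).map
        (fun i : Nat => salt.getD (PySem.Int.mod (pos + (i : Int)) 7).toNat ' '))

-- ===== PRECONDITION & SPEC =====
-- Pre_ excludes exactly the inputs on which A raises IndexError:
-- a word shorter than 40 with pos outside -7..7 reaches salt[pos] out of range.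
def Pre_rellenar (palabra : String) (pos : Int) : Prop :=
  40 ≤ palabra.length ∨ (-7 ≤ pos ∧ pos ≤ 7)
instance (palabra : String) (pos : Int) : Decidable (Pre_rellenar palabra pos) := by
  unfold Pre_rellenar; infer_instance

def pvWitness_rellenar : String × Int := ("abc", 3)

-- When len(palabra) < 40 and pos is outside -7..7 A raises IndexError on salt[pos];
-- B returns the word padded cyclically from position pos % 7.
def Raises_rellenar (palabra : String) (pos : Int) : Prop :=
  palabra.length < 40 ∧ (pos < -7 ∨ 7 < pos)
instance (palabra : String) (pos : Int) : Decidable (Raises_rellenar palabra pos) := by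
  unfold Raises_rellenar; infer_instance
def pvRaiseWitness_rellenar : String × Int := ("", 100)
def pvRaiseWitnessOut_rellenar : String := "aBbCc1AaBbCc1AaBbCc1AaBbCc1AaBbCc1AaBbCc"

def Spec_rellenar (palabra : String) (pos : Int) (out : String) : Prop := out = rellenar_alt palabra pos
instance (palabra : String) (pos : Int) (out : String) : Decidable (Spec_rellenar palabra pos out) := by unfold Spec_rellenar; infer_instance

-- ===== CLAIM (what is proved, stated in full; the proofs are below) =====
def Claim_equal_rellenar : Prop := ∀ (palabra : String) (pos : Int), Dom_rellenar palabra pos → Pre_rellenar palabra pos → Spec_rellenar palabra pos (rellenar palabra pos)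

def Claim_raises_rellenar : Prop :=
  (∀ (palabra : String) (pos : Int), Dom_rellenar palabra pos → Raises_rellenar palabra pos → ¬ Pre_rellenar palabra pos) ∧
  (Dom_rellenar (pvRaiseWitness_rellenar.1) (pvRaiseWitness_rellenar.2) ∧
   Raises_rellenar (pvRaiseWitness_rellenar.1) (pvRaiseWitness_rellenar.2) ∧
   rellenar_alt (pvRaiseWitness_rellenar.1) (pvRaiseWitness_rellenar.2) = pvRaiseWitnessOut_rellenar)

-- ===== LEMMAS AND PROOFS =====

-- the character B appends at (logical) position q
def pvCyc (q : Int) : Char :=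
  ['1', 'A', 'a', 'B', 'b', 'C', 'c'].getD (PySem.Int.mod q 7).toNat ' '

lemma pvCyc_congr (a b : Int) (h : a % 7 = b % 7) : pvCyc a = pvCyc b := by
  unfold pvCyc
  rw [PySem.Int.mod_eq_emod_of_pos (by norm_num), PySem.Int.mod_eq_emod_of_pos (by norm_num), h]

-- closed-form characterisation of B's output
lemma alt_toList (palabra : String) (pos : Int) :
    (rellenar_alt palabra pos).toList =
      palabra.toList ++ (List.range (40 - palabra.length)).map (fun i : Nat => pvCyc (pos + (i : Int))) := by
  unfold rellenar_alt pvCyc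
  by_cases h : (40 : Int) - (palabra.length : Int) ≤ 0
  · rw [if_pos h, Nat.sub_eq_zero_of_le (by omega)]
    simp
  · rw [if_neg h, show ((40 : Int) - (palabra.length : Int)).toNat = 40 - palabra.length from by omega]
    simp

-- one unfolding of A on a word still shorter than 40, for in-range pos
lemma rellenar_step (w : String) (p : Int) (hw : w.length < 40) (hlo : -7 ≤ p) (hhi : p ≤ 7) :
    rellenar w p = rellenar (w.push (pvCyc p)) ((if p = 7 then 0 else p) + 1) := by
  have hget : PySem.List.pyGet? ['1','A','a','B','b','C','c'] (if p = 7 then 0 else p)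
      = some (pvCyc p) := by
    interval_cases p <;> decide
  conv_lhs => rw [rellenar]
  rw [dif_pos hw, show ((['1','A','a','B','b','C','c'] : List Char).length : Int) = 7 from by norm_num,
    hget]

-- the same closed form for A, by induction on the number of missing characters
lemma rellenar_toList : ∀ (k : Nat) (w : String) (p : Int), 40 - w.length ≤ k → -7 ≤ p → p ≤ 7 →
    (rellenar w p).toList =
      w.toList ++ (List.range (40 - w.length)).map (fun i : Nat => pvCyc (p + (i : Int))) := by
  intro k
  induction k with
  | zero =>
    intro w p hk _ _
    rw [rellenar, dif_neg (by omega), Nat.sub_eq_zero_of_le (by omega)]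
    simp
  | succ k ih =>
    intro w p hk hlo hhi
    by_cases hw : w.length < 40
    · rw [rellenar_step w p hw hlo hhi,
        ih (w.push (pvCyc p)) ((if p = 7 then 0 else p) + 1)
          (by rw [String.length_push]; omega)
          (by split <;> omega)
          (by split <;> omega),
        String.length_push, String.toList_push,
        show 40 - w.length = (40 - (w.length + 1)) + 1 from by omega,
        List.range_succ_eq_map]
      rw [List.map_cons, List.map_map, List.append_assoc, List.singleton_append]
      congr 1
      congr 1
      · exact (pvCyc_congr _ _ (by push_cast; omega)).symm
      · apply List.map_congr_left
        intro i _
        refine (pvCyc_congr _ _ ?_).symm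
        push_cast
        split <;> omega
    · rw [rellenar, dif_neg hw, Nat.sub_eq_zero_of_le (by omega)]
      simp

theorem rellenar_spec : Claim_equal_rellenar := by
  intro palabra pos _ hpre
  unfold Spec_rellenar
  apply String.ext
  rcases hpre with h40 | hbnd
  · rw [rellenar, dif_neg (by omega), alt_toList, Nat.sub_eq_zero_of_le (by omega)]
    simp
  · rw [rellenar_toList 40 palabra pos (by omega) hbnd.1 hbnd.2, alt_toList]

-- ===== VERDICT (by name: the statement is the Claim_ definition above) =====
@[simp] theorem rellenar_raises : Claim_raises_rellenar := by
  unfold Claim_raises_rellenar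
  constructor
  · intro palabra pos _ hr hpre
    unfold Raises_rellenar at hr
    unfold Pre_rellenar at hpre
    omega
  · exact ⟨by decide, by decide, by decide⟩
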